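-- pv_equiv track=rewrite | github.com/42jerrykim/42jerrykim.github.io | script/update_pythoncheatsheet_slugs.py | upsert_slug
-- ===== SOURCE A (Python) =====
-- def upsert_slug(fm_text: str, slug: str) -> str:
--     lines = fm_text.splitlines()
--     for i, line in enumerate(lines):
--         if line.startswith("slug:"):
--             lines[i] = f'slug: "{slug}"'
--             return "\n".join(lines)
--
--     insert_at = 0
--     for i, line in enumerate(lines):
--         if line.startswith("title:"):
--             insert_at = i + 1
--             break
--         if line.startswith("image:") or line.startswith("featured_image:"):
--             insert_at = i + 1
--
--     lines.insert(insert_at, f'slug: "{slug}"')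
--     return "\n".join(lines)
-- ===== SOURCE B (Python) =====
-- def upsert_slug(fm_text: str, slug: str) -> str:
--     lines = fm_text.splitlines()
--     slug_idx = None
--     insert_at = 0
--     title_found = False
--     for i, line in enumerate(lines):
--         if slug_idx is None and line.startswith("slug:"):
--             slug_idx = i
--         if not title_found:
--             if line.startswith("title:"):
--                 insert_at = i + 1
--                 title_found = True
--             elif line.startswith("image:") or line.startswith("featured_image:"):
--                 insert_at = i + 1
--     new_line = f'slug: "{slug}"'
--     if slug_idx is not None:
--         lines[slug_idx] = new_line
--     else:
--         lines.insert(insert_at, new_line)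
--     return "\n".join(lines)
-- ===== Notes on version B (the rewrite author's own statement) =====
-- stated objective: alternative
-- what changed: A makes two separate indexed scans over the lines (one to find and replace a slug: line with an early return, a second to locate the insert position); B makes a single combined pass maintaining (slug_idx, insert_at, title_found) and applies the replace-or-insert once at the end.
import Mathlib
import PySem

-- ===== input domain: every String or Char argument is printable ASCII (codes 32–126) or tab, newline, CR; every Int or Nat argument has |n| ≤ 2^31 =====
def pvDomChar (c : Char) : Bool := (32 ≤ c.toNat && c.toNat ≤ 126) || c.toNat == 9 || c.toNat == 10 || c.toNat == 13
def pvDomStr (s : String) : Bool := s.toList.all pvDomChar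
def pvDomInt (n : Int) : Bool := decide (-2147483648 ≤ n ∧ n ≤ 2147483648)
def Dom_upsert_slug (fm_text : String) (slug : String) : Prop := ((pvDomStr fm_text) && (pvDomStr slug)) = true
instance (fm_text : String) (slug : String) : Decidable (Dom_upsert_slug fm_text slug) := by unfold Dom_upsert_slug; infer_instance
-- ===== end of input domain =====

-- B merges A's two separate index scans (find-slug, then find-insert-position) into one
-- combined pass carrying (slug_idx, insert_at, title_found); same result, different decomposition.

-- the line f'slug: "{slug}"'
def pvNewLine (slug : String) : String := "slug: \"" ++ slug ++ "\""

-- ===== PORT A =====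
-- first loop of A: replace the first line starting with "slug:" and return the list; none = no such line (the loop falls through)
def pvAReplace (lines : List String) (slug : String) : Option (List String) :=
  match lines with
  | [] => none
  | l :: rest =>
    if PySem.Str.startswith l "slug:" then some (pvNewLine slug :: rest)
    else (pvAReplace rest slug).map (fun ls => l :: ls)

-- second loop of A: compute insert_at (i = current index, acc = insert_at so far; "title:" breaks)
def pvAInsertAt (lines : List String) (i : Nat) (acc : Nat) : Nat :=
  match lines with
  | [] => acc
  | l :: rest =>
    if PySem.Str.startswith l "title:" then i + 1
    else if PySem.Str.startswith l "image:" || PySem.Str.startswith l "featured_image:" then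
      pvAInsertAt rest (i + 1) (i + 1)
    else pvAInsertAt rest (i + 1) acc

def upsert_slug (fm_text : String) (slug : String) : String :=
  let lines := PySem.Str.splitlines fm_text
  match pvAReplace lines slug with
  | some ls => PySem.Str.join "\n" ls
  | none =>
    PySem.Str.join "\n"
      (PySem.List.insert lines ((pvAInsertAt lines 0 0 : Nat) : Int) (pvNewLine slug))

-- ===== PORT B =====
-- B's single pass: state (slug_idx, insert_at, title_found)
def pvBScan (lines : List String) (i : Nat) (si : Option Nat) (ia : Nat) (tf : Bool) :
    Option Nat × Nat :=
  match lines with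
  | [] => (si, ia)
  | l :: rest =>
    let si' := if si.isNone && PySem.Str.startswith l "slug:" then some i else si
    if tf then pvBScan rest (i + 1) si' ia true
    else if PySem.Str.startswith l "title:" then pvBScan rest (i + 1) si' (i + 1) true
    else if PySem.Str.startswith l "image:" || PySem.Str.startswith l "featured_image:" then
      pvBScan rest (i + 1) si' (i + 1) false
    else pvBScan rest (i + 1) si' ia false

def upsert_slug_alt (fm_text : String) (slug : String) : String :=
  let lines := PySem.Str.splitlines fm_text
  let nl := pvNewLine slug
  match pvBScan lines 0 none 0 false with
  | (some k, _) => PySem.Str.join "\n" (lines.set k nl)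
  | (none, ia) => PySem.Str.join "\n" (PySem.List.insert lines ((ia : Nat) : Int) nl)

-- ===== PRECONDITION & SPEC =====
def Spec_upsert_slug (fm_text : String) (slug : String) (out : String) : Prop := out = upsert_slug_alt fm_text slug
instance (fm_text : String) (slug : String) (out : String) : Decidable (Spec_upsert_slug fm_text slug out) := by unfold Spec_upsert_slug; infer_instance

-- ===== CLAIM (what is proved, stated in full; the proofs are below) =====
def Claim_equal_upsert_slug : Prop := ∀ (fm_text : String) (slug : String), Dom_upsert_slug fm_text slug → Spec_upsert_slug fm_text slug (upsert_slug fm_text slug)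

-- ===== LEMMAS AND PROOFS =====

-- A's first loop finds the first "slug:" line (as an index) and sets it
theorem pvAReplace_eq (lines : List String) (slug : String) :
    pvAReplace lines slug =
      (lines.findIdx? (fun l => PySem.Str.startswith l "slug:")).map
        (fun j => lines.set j (pvNewLine slug)) := by
  induction lines with
  | nil => simp [pvAReplace]
  | cons l rest ih =>
    simp only [pvAReplace, List.findIdx?_cons]
    by_cases h : PySem.Str.startswith l "slug:" = true
    · rw [if_pos h, if_pos h]; rfl
    · rw [if_neg h, if_neg h, ih, Option.map_map]
      cases List.findIdx? (fun l => PySem.Str.startswith l "slug:") rest <;> rfl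

-- B's slug_idx component is frozen once found
theorem pvBScan_fst_some (lines : List String) (i : Nat) (k : Nat) (ia : Nat) (tf : Bool) :
    (pvBScan lines i (some k) ia tf).1 = some k := by
  induction lines generalizing i ia tf with
  | nil => simp [pvBScan]
  | cons l rest ih =>
    simp only [pvBScan, Option.isNone_some, Bool.false_and, Bool.false_eq_true, if_false]
    split_ifs <;> exact ih ..

-- B's slug_idx component, while not yet found: the first "slug:" index, offset by i
theorem pvBScan_fst_none (lines : List String) (i : Nat) (ia : Nat) (tf : Bool) :
    (pvBScan lines i none ia tf).1 =
      (lines.findIdx? (fun l => PySem.Str.startswith l "slug:")).map (fun j => j + i) := by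
  induction lines generalizing i ia tf with
  | nil => simp [pvBScan]
  | cons l rest ih =>
    rw [List.findIdx?_cons]
    by_cases h : PySem.Str.startswith l "slug:" = true
    · rw [if_pos h]
      simp only [pvBScan, Option.isNone_none, Bool.true_and, if_pos h]
      split_ifs <;> simp [pvBScan_fst_some]
    · rw [if_neg h]
      simp only [pvBScan, Option.isNone_none, Bool.true_and, if_neg h]
      have : ∀ o : Option Nat,
          (o.map (fun j => j + (i + 1))) = (o.map (fun j => j + 1)).map (fun j => j + i) := by
        intro o; cases o <;> simp [Nat.add_assoc, Nat.add_comm 1 i]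
      split_ifs <;> rw [ih, this]

-- B's insert_at component, after a title has been seen: frozen
theorem pvBScan_snd_true (lines : List String) (i : Nat) (si : Option Nat) (ia : Nat) :
    (pvBScan lines i si ia true).2 = ia := by
  induction lines generalizing i si ia with
  | nil => simp [pvBScan]
  | cons l rest ih => simp [pvBScan, ih]

-- B's insert_at component, before a title: it is A's second loop
theorem pvBScan_snd_false (lines : List String) (i : Nat) (si : Option Nat) (ia : Nat) :
    (pvBScan lines i si ia false).2 = pvAInsertAt lines i ia := by
  induction lines generalizing i si ia with
  | nil => simp [pvBScan, pvAInsertAt]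
  | cons l rest ih =>
    simp only [pvBScan, pvAInsertAt, Bool.false_eq_true, if_false]
    split_ifs <;> simp [ih, pvBScan_snd_true]

-- ===== VERDICT (by name: the statement is the Claim_ definition above) =====
theorem upsert_slug_spec : Claim_equal_upsert_slug := by
  intro fm_text slug _
  unfold Spec_upsert_slug upsert_slug upsert_slug_alt
  simp only []
  generalize PySem.Str.splitlines fm_text = lines
  rcases hf : lines.findIdx? (fun l => PySem.Str.startswith l "slug:") with _ | j
  · have hA : pvAReplace lines slug = none := by rw [pvAReplace_eq, hf]; rfl
    have hB := pvBScan_fst_none lines 0 0 false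
    rw [hf] at hB
    rcases hs : pvBScan lines 0 none 0 false with ⟨si, ia⟩
    rw [hs] at hB
    have hia : ia = pvAInsertAt lines 0 0 := by
      have := pvBScan_snd_false lines 0 none 0
      rw [hs] at this; exact this
    simp only [Option.map_none] at hB
    subst hB hia
    simp [hA]
  · have hA : pvAReplace lines slug = some (lines.set j (pvNewLine slug)) := by
      rw [pvAReplace_eq, hf]; rfl
    have hB := pvBScan_fst_none lines 0 0 false
    rw [hf] at hB
    rcases hs : pvBScan lines 0 none 0 false with ⟨si, ia⟩
    rw [hs] at hB
    simp only [Option.map_some] at hB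
    subst hB
    simp [hA]
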